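-- pv_equiv track=rewrite | github.com/JeanCarlosSantacruz/python-projects | examen2.py | obtenerMatriz
-- ===== SOURCE A (Python) =====
-- def obtenerMatriz (n):
--     matriz= []
--     cont= 0
--     while cont < n:
--         inicio= cont+1
--         lista= []
--         i= 0
--         while i < n:
--             lista.append (inicio)
--             inicio+= n
--             i+= 1
--         matriz.append (lista)
--         cont+=1
--     return matriz
-- ===== SOURCE B (Python) =====
-- def obtenerMatriz(n):
--     if n <= 0:
--         return []
--     bloques = [list(range(c * n + 1, c * n + n + 1)) for c in range(n)]
--     return [list(fila) for fila in zip(*bloques)]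
-- ===== Notes on version B (the rewrite author's own statement) =====
-- stated objective: alternative
-- what changed: Instead of filling each row with an arithmetic progression of stride n, B builds per-column blocks of n consecutive integers and transposes them with zip(*bloques).
import Mathlib
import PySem

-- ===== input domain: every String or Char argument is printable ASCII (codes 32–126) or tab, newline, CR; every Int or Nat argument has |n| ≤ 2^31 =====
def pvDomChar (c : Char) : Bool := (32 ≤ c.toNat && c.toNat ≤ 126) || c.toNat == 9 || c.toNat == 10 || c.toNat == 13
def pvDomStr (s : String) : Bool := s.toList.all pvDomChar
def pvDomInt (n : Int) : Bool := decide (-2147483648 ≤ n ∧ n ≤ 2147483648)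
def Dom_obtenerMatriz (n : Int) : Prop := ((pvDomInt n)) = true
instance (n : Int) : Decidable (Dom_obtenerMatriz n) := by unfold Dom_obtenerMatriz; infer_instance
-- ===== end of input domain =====

-- B builds per-column blocks of n consecutive integers and transposes them (zip(*bloques)),
-- instead of A's row-by-row arithmetic-progression fill: an alternative decomposition, same cost.

-- ===== PORT A =====
-- inner while: lista.append(inicio); inicio += n; i += 1
def obtenerMatrizRow (n inicio i : Int) : List Int :=
  if _h : i < n then inicio :: obtenerMatrizRow n (inicio + n) (i + 1)
  else []
termination_by (n - i).toNat
decreasing_by omega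

-- outer while: matriz.append(lista); cont += 1
def obtenerMatrizOuter (n cont : Int) : List (List Int) :=
  if _h : cont < n then obtenerMatrizRow n (cont + 1) 0 :: obtenerMatrizOuter n (cont + 1)
  else []
termination_by (n - cont).toNat
decreasing_by omega

def obtenerMatriz (n : Int) : List (List Int) := obtenerMatrizOuter n 0

-- ===== PORT B =====
-- zip(*xss): repeatedly take heads until some list is exhausted (zip truncates to the shortest)
def zipStar (xss : List (List Int)) : List (List Int) :=
  if _h : xss = [] ∨ xss.any (·.isEmpty) then []
  else xss.map (·.headI) :: zipStar (xss.map (·.tail))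
termination_by xss.headI.length
decreasing_by
  rcases xss with _ | ⟨x, xs⟩
  · simp at _h
  · rcases x with _ | ⟨a, x⟩
    · simp at _h
    · simp

def obtenerMatriz_alt (n : Int) : List (List Int) :=
  if n ≤ 0 then []
  else
    zipStar ((PySem.List.pyRange 0 n 1).map (fun c => PySem.List.pyRange (c * n + 1) (c * n + n + 1) 1))

-- ===== PRECONDITION & SPEC =====
def Spec_obtenerMatriz (n : Int) (out : List (List Int)) : Prop := out = obtenerMatriz_alt n
instance (n : Int) (out : List (List Int)) : Decidable (Spec_obtenerMatriz n out) := by unfold Spec_obtenerMatriz; infer_instance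

-- ===== CLAIM (what is proved, stated in full; the proofs are below) =====
def Claim_equal_obtenerMatriz : Prop := ∀ (n : Int), Dom_obtenerMatriz n → Spec_obtenerMatriz n (obtenerMatriz n)

-- ===== LEMMAS AND PROOFS =====

theorem obtenerMatrizRow_eq (n : Int) : ∀ (m : Nat) (a i : Int), (n - i).toNat = m →
    obtenerMatrizRow n a i = (List.range m).map (fun c : Nat => a + (c : Int) * n) := by
  intro m
  induction m with
  | zero =>
    intro a i h
    rw [obtenerMatrizRow, dif_neg (by omega)]
    simp
  | succ k ih =>
    intro a i h
    rw [obtenerMatrizRow, dif_pos (by omega)]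
    rw [ih (a + n) (i + 1) (by omega)]
    rw [List.range_succ_eq_map]
    simp only [List.map_cons, List.map_map, Function.comp_def, Nat.cast_zero]
    congr 1
    · ring
    · apply List.map_congr_left
      intro c _
      push_cast
      ring

theorem obtenerMatrizOuter_eq (n : Int) : ∀ (m : Nat) (cont : Int), (n - cont).toNat = m →
    obtenerMatrizOuter n cont =
      (List.range m).map (fun r : Nat => obtenerMatrizRow n (cont + (r : Int) + 1) 0) := by
  intro m
  induction m with
  | zero =>
    intro cont h
    rw [obtenerMatrizOuter, dif_neg (by omega)]
    simp
  | succ k ih =>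
    intro cont h
    rw [obtenerMatrizOuter, dif_pos (by omega)]
    rw [ih (cont + 1) (by omega)]
    rw [List.range_succ_eq_map]
    simp only [List.map_cons, List.map_map, Function.comp_def, Nat.cast_zero]
    congr 1
    · norm_num
    · apply List.map_congr_left
      intro r _
      congr 1
      push_cast
      ring

-- zip(*) of a rectangular matrix whose rows are given by an index function: the transpose law
theorem zipStar_rect (L : Nat) : ∀ (cols : List Int) (h : Int → Nat → Int), cols ≠ [] →
    zipStar (cols.map (fun c => (List.range L).map (h c))) =
      (List.range L).map (fun r => cols.map (fun c => h c r)) := by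
  induction L with
  | zero =>
    intro cols h hne
    rw [zipStar, dif_pos]
    · simp
    · right
      rcases cols with _ | ⟨c, cs⟩
      · simp at hne
      · simp
  | succ k ih =>
    intro cols h hne
    rw [zipStar, dif_neg]
    · have h1 : (cols.map (fun c => (List.range (k + 1)).map (h c))).map (·.headI) =
          cols.map (fun c => h c 0) := by
        simp only [List.map_map, Function.comp_def]
        apply List.map_congr_left
        intro c _
        rw [List.range_succ_eq_map]
        simp
      have h2 : (cols.map (fun c => (List.range (k + 1)).map (h c))).map (·.tail) =
          cols.map (fun c => (List.range k).map (fun r => h c (r + 1))) := by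
        simp only [List.map_map, Function.comp_def]
        apply List.map_congr_left
        intro c _
        rw [List.range_succ_eq_map]
        simp [List.map_map, Function.comp_def]
      rw [h1, h2, ih cols (fun c r => h c (r + 1)) hne]
      rw [List.range_succ_eq_map]
      simp
    · intro hc
      rcases hc with hc | hc
      · rcases cols with _ | ⟨c, cs⟩
        · exact hne rfl
        · simp at hc
      · rw [List.any_eq_true] at hc
        obtain ⟨l, hl, hemp⟩ := hc
        simp only [List.mem_map] at hl
        obtain ⟨c, _, rfl⟩ := hl
        rw [List.range_succ_eq_map] at hemp
        simp at hemp

-- ===== VERDICT (by name: the statement is the Claim_ definition above) =====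
theorem obtenerMatriz_spec : Claim_equal_obtenerMatriz := by
  intro n _
  unfold Spec_obtenerMatriz obtenerMatriz obtenerMatriz_alt
  by_cases hn : n ≤ 0
  · rw [if_pos hn, obtenerMatrizOuter, dif_neg (by omega)]
  · rw [if_neg hn]
    rw [not_le] at hn
    rw [obtenerMatrizOuter_eq n n.toNat 0 (by omega)]
    have hrange : ∀ a b : Int, PySem.List.pyRange a b 1 =
        (List.range (b - a).toNat).map (fun k : Nat => a + (k : Int)) :=
      fun a b => PySem.List.pyRange_one a b
    rw [hrange 0 n]
    simp only [Int.sub_zero]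
    rw [List.map_map]
    have heq : (List.range n.toNat).map
          ((fun c => PySem.List.pyRange (c * n + 1) (c * n + n + 1) 1) ∘
            fun k : Nat => (0 : Int) + (k : Int)) =
        (List.range n.toNat).map
          (fun c : Nat => (List.range n.toNat).map
            (fun r : Nat => ((0 : Int) + (c : Int)) * n + 1 + (r : Int))) := by
      apply List.map_congr_left
      intro c _
      simp only [Function.comp_def]
      rw [hrange]
      have : ((0 : Int) + (c : Int)) * n + n + 1 - (((0 : Int) + (c : Int)) * n + 1) = n := by ring
      rw [this]
    rw [heq]
    have hstep : (List.range n.toNat).map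
          (fun c : Nat => (List.range n.toNat).map
            (fun r : Nat => ((0 : Int) + (c : Int)) * n + 1 + (r : Int))) =
        ((List.range n.toNat).map (fun k : Nat => ((k : Int)))).map
          (fun c : Int => (List.range n.toNat).map
            (fun r : Nat => (fun (c : Int) (r : Nat) => c * n + 1 + (r : Int)) c r)) := by
      rw [List.map_map]
      apply List.map_congr_left
      intro c _
      simp only [Function.comp_def]
      apply List.map_congr_left
      intro r _
      ring
    rw [hstep]
    rw [zipStar_rect n.toNat ((List.range n.toNat).map (fun k : Nat => ((k : Int))))
      (fun (c : Int) (r : Nat) => c * n + 1 + (r : Int))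
      (by simp only [ne_eq, List.map_eq_nil_iff, List.range_eq_nil]; omega)]
    apply List.map_congr_left
    intro r hr
    rw [obtenerMatrizRow_eq n n.toNat _ 0 (by omega), List.map_map]
    apply List.map_congr_left
    intro c _
    simp only [Function.comp_def]
    ring
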